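-- pv_equiv track=rewrite | github.com/mortyc126-debug/SHA-256 | exp17_coupling_bridge.py | carry_vector_full
-- ===== SOURCE A (Python) =====
-- def carry_vector_full(a, b, n=32):
--     """Full carry vector for a+b."""
--     carries = []
--     c = 0
--     for i in range(n):
--         ai = (a >> i) & 1
--         bi = (b >> i) & 1
--         s = ai + bi + c
--         c = 1 if s >= 2 else 0
--         carries.append(c)
--     return carries
-- ===== SOURCE B (Python) =====
-- def carry_vector_full(a, b, n=32):
--     """Full carry vector for a+b, read off the carry bits of (a+b)^a^b."""
--     t = (a + b) ^ a ^ b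
--     return [(t >> (i + 1)) & 1 for i in range(n)]
-- ===== Notes on version B (the rewrite author's own statement) =====
-- stated objective: alternative
-- what changed: Replaces the sequential ripple-carry loop (full-adder state threaded through each bit) by the closed-form identity t = (a+b)^a^b, whose bit i+1 is exactly the carry out of bit i, followed by a single bit-extraction pass.
import Mathlib
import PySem

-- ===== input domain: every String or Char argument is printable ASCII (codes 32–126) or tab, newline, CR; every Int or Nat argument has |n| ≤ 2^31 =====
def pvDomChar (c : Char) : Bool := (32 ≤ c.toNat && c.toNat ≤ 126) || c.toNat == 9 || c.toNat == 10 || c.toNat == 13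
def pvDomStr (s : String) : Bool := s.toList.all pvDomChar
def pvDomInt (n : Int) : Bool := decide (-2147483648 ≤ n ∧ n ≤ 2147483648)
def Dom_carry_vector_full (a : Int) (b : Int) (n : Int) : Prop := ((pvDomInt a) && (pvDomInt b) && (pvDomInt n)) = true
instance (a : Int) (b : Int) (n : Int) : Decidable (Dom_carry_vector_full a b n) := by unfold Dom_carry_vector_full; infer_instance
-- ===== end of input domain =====

-- B replaces A's ripple-carry loop by the closed form t = (a+b)^a^b, whose bit i+1 is the
-- carry out of bit i, then extracts the bits (objective: simpler).

-- ===== PORT A =====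
-- literal port of A: ripple-carry loop, state = (carries list, current carry c)
def carry_vector_full (a : Int) (b : Int) (n : Int) : List Int :=
  ((PySem.List.pyRange 0 n 1).foldl
    (fun (st : List Int × Int) (i : Int) =>
      let ai := PySem.Int.band (a >>> i.toNat) 1
      let bi := PySem.Int.band (b >>> i.toNat) 1
      let s := ai + bi + st.2
      let c : Int := if 2 ≤ s then 1 else 0
      (st.1 ++ [c], c))
    ([], 0)).1

-- ===== PORT B =====
-- literal port of B: t = (a+b)^a^b once, then a comprehension extracting bit i+1
def carry_vector_full_alt (a : Int) (b : Int) (n : Int) : List Int :=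
  let t := PySem.Int.bxor (PySem.Int.bxor (a + b) a) b
  (PySem.List.pyRange 0 n 1).map (fun i => PySem.Int.band (t >>> (i + 1).toNat) 1)

-- ===== PRECONDITION & SPEC =====
def Spec_carry_vector_full (a : Int) (b : Int) (n : Int) (out : List Int) : Prop := out = carry_vector_full_alt a b n
instance (a : Int) (b : Int) (n : Int) (out : List Int) : Decidable (Spec_carry_vector_full a b n out) := by unfold Spec_carry_vector_full; infer_instance

-- ===== CLAIM (what is proved, stated in full; the proofs are below) =====
def Claim_equal_carry_vector_full : Prop := ∀ (a : Int) (b : Int) (n : Int), Dom_carry_vector_full a b n → Spec_carry_vector_full a b n (carry_vector_full a b n)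

-- ===== LEMMAS AND PROOFS =====

-- bit k of x, as the ports compute it; numerically (x / 2^k) % 2 (floor div / nonneg mod)
def pvBit (x : Int) (k : Nat) : Int := (x / 2 ^ k) % 2

-- carry into position k when adding a and b
def pvCar (a b : Int) (k : Nat) : Int := (a % 2 ^ k + b % 2 ^ k) / 2 ^ k

theorem pv_divmod (x p q r : Int) (hp : 0 < p) (hx : r + p * q = x)
    (h0 : 0 ≤ r) (h1 : r < p) : x / p = q ∧ x % p = r :=
  (Int.ediv_emod_unique hp).mpr ⟨hx, h0, h1⟩

theorem pv_cast_div (m k : Nat) : (m : Int) / 2 ^ k = ((m / 2 ^ k : Nat) : Int) := by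
  rw [show ((2:Int) ^ k) = ((2 ^ k : Nat) : Int) by push_cast; ring, ← Int.natCast_div]

theorem pv_shiftRight_eq_ediv (x : Int) (k : Nat) : x >>> k = x / 2 ^ k := by
  cases x with
  | ofNat m =>
      show ((m >>> k : Nat) : Int) = (m : Int) / 2 ^ k
      rw [Nat.shiftRight_eq_div_pow, pv_cast_div]
  | negSucc m =>
      show Int.negSucc (m >>> k) = Int.negSucc m / 2 ^ k
      have hp : (0:Int) < 2 ^ k := by positivity
      have hdm' : (2:Int) ^ k * ((m / 2 ^ k : Nat) : Int) + ((m % 2 ^ k : Nat) : Int) = m := by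
        exact_mod_cast Nat.div_add_mod m (2 ^ k)
      have hlt' : ((m % 2 ^ k : Nat) : Int) < 2 ^ k := by
        exact_mod_cast Nat.mod_lt m (show 0 < 2 ^ k by positivity)
      have hge : (0:Int) ≤ ((m % 2 ^ k : Nat) : Int) := Int.natCast_nonneg _
      have h := (pv_divmod (Int.negSucc m) (2 ^ k) (-((m / 2 ^ k : Nat) : Int) - 1)
        (2 ^ k - 1 - ((m % 2 ^ k : Nat) : Int)) hp
        (by rw [Int.negSucc_eq]; linarith) (by linarith) (by linarith)).1
      rw [h, Nat.shiftRight_eq_div_pow, Int.negSucc_eq]; push_cast; ring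

theorem pv_mod_two (y : Int) : PySem.Int.mod y 2 = y % 2 := by
  show y.fmod 2 = y % 2
  rw [Int.fmod_eq_emod_of_nonneg _ (by norm_num)]

theorem pv_band_bit (x : Int) (k : Nat) : PySem.Int.band (x >>> k) 1 = pvBit x k := by
  rw [PySem.Int.band_one, pv_mod_two, pv_shiftRight_eq_ediv, pvBit]

theorem pv_band_bit_int (x : Int) (k : Nat) :
    PySem.Int.band (x >>> ((k : Nat) : Int)) 1 = pvBit x k := by
  rw [Int.shiftRight_natCast_right]; exact pv_band_bit x k

theorem pv_bit_testBit (x : Int) (k : Nat) : pvBit x k = if x.testBit k then 1 else 0 := by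
  cases x with
  | ofNat m =>
      have ht : (Int.ofNat m).testBit k = m.testBit k := rfl
      show ((m:Int)) / 2 ^ k % 2 = if (Int.ofNat m).testBit k then 1 else 0
      rw [ht, pv_cast_div, Nat.testBit_eq_decide_div_mod_eq]
      generalize (m / 2 ^ k) = q
      rcases Nat.mod_two_eq_zero_or_one q with h | h <;> rw [h] <;> simp <;> omega
  | negSucc m =>
      have ht : (Int.negSucc m).testBit k = !(m.testBit k) := rfl
      have h2 : Int.negSucc m / 2 ^ k = -((m / 2 ^ k : Nat) : Int) - 1 := by
        rw [← pv_shiftRight_eq_ediv]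
        show Int.negSucc (m >>> k) = _
        rw [Nat.shiftRight_eq_div_pow, Int.negSucc_eq]; push_cast; ring
      show Int.negSucc m / 2 ^ k % 2 = if (Int.negSucc m).testBit k then 1 else 0
      rw [ht, h2, Nat.testBit_eq_decide_div_mod_eq]
      generalize (m / 2 ^ k) = q
      rcases Nat.mod_two_eq_zero_or_one q with h | h <;> rw [h] <;> simp <;> omega

theorem pv_bxor_eq_xor (x y : Int) : PySem.Int.bxor x y = Int.xor x y := by
  cases x with
  | ofNat m =>
      cases y with
      | ofNat nn =>
          show PySem.Int.bxor (m:Int) (nn:Int) = ((m ^^^ nn : Nat) : Int)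
          rw [PySem.Int.bxor]
          simp [Int.toNat_natCast]
      | negSucc nn =>
          show PySem.Int.bxor (m:Int) (Int.negSucc nn) = Int.negSucc (m ^^^ nn)
          rw [PySem.Int.bxor]
          have h1 : ¬ (0:Int) ≤ Int.negSucc nn := by simp [Int.negSucc_eq]; omega
          simp only [Int.natCast_nonneg, if_true, h1, if_false]
          have h2 : (-(Int.negSucc nn) - 1).toNat = nn := by rw [Int.negSucc_eq]; omega
          rw [h2, Int.toNat_natCast, Int.negSucc_eq]; ring
  | negSucc m =>
      cases y with
      | ofNat nn =>
          show PySem.Int.bxor (Int.negSucc m) (nn:Int) = Int.negSucc (m ^^^ nn)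
          rw [PySem.Int.bxor]
          have h1 : ¬ (0:Int) ≤ Int.negSucc m := by simp [Int.negSucc_eq]; omega
          simp only [h1, if_false, Int.natCast_nonneg, if_true]
          have h2 : (-(Int.negSucc m) - 1).toNat = m := by rw [Int.negSucc_eq]; omega
          rw [h2, Int.toNat_natCast, Int.negSucc_eq]; ring
      | negSucc nn =>
          show PySem.Int.bxor (Int.negSucc m) (Int.negSucc nn) = ((m ^^^ nn : Nat) : Int)
          rw [PySem.Int.bxor]
          have h1 : ¬ (0:Int) ≤ Int.negSucc m := by simp [Int.negSucc_eq]; omega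
          have h2 : ¬ (0:Int) ≤ Int.negSucc nn := by simp [Int.negSucc_eq]; omega
          simp only [h1, h2, if_false]
          have h3 : (-(Int.negSucc m) - 1).toNat = m := by rw [Int.negSucc_eq]; omega
          have h4 : (-(Int.negSucc nn) - 1).toNat = nn := by rw [Int.negSucc_eq]; omega
          rw [h3, h4]

theorem pv_bit_bxor (x y : Int) (k : Nat) :
    pvBit (PySem.Int.bxor x y) k = (pvBit x k + pvBit y k) % 2 := by
  rw [pv_bxor_eq_xor, pv_bit_testBit, pv_bit_testBit x, pv_bit_testBit y, Int.testBit_lxor]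
  cases hx : x.testBit k <;> cases hy : y.testBit k <;> simp

-- (a+b)/2^k = a/2^k + b/2^k + carry_k
theorem pv_ediv_add (a b : Int) (k : Nat) :
    (a + b) / 2 ^ k = a / 2 ^ k + b / 2 ^ k + pvCar a b k := by
  have hp : (0:Int) < 2 ^ k := by positivity
  have h1 := Int.emod_add_ediv a (2 ^ k)
  have h2 := Int.emod_add_ediv b (2 ^ k)
  have h3 := Int.emod_add_ediv (a % 2 ^ k + b % 2 ^ k) (2 ^ k)
  have hr1 : 0 ≤ (a % 2 ^ k + b % 2 ^ k) % 2 ^ k := Int.emod_nonneg _ (by positivity)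
  have hr2 : (a % 2 ^ k + b % 2 ^ k) % 2 ^ k < 2 ^ k := Int.emod_lt_of_pos _ hp
  exact (pv_divmod (a + b) (2 ^ k) (a / 2 ^ k + b / 2 ^ k + pvCar a b k)
    ((a % 2 ^ k + b % 2 ^ k) % 2 ^ k) hp
    (by rw [pvCar]; linear_combination h1 + h2 + h3) hr1 hr2).1

theorem pv_car_bounds (a b : Int) (k : Nat) : 0 ≤ pvCar a b k ∧ pvCar a b k ≤ 1 := by
  have hp : (0:Int) < 2 ^ k := by positivity
  have ha1 : 0 ≤ a % 2 ^ k := Int.emod_nonneg _ (by positivity)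
  have ha2 : a % 2 ^ k < 2 ^ k := Int.emod_lt_of_pos _ hp
  have hb1 : 0 ≤ b % 2 ^ k := Int.emod_nonneg _ (by positivity)
  have hb2 : b % 2 ^ k < 2 ^ k := Int.emod_lt_of_pos _ hp
  constructor
  · exact Int.ediv_nonneg (by linarith) (by linarith)
  · rw [pvCar]
    have h := Int.ediv_lt_of_lt_mul hp
      (show a % 2 ^ k + b % 2 ^ k < 2 * 2 ^ k by linarith)
    exact Int.lt_add_one_iff.mp h

-- a % 2^(k+1) = a % 2^k + 2^k * bit_k(a)
theorem pv_emod_succ (a : Int) (k : Nat) :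
    a % 2 ^ (k + 1) = a % 2 ^ k + 2 ^ k * pvBit a k := by
  have hp : (0:Int) < 2 ^ k := by positivity
  have h1 := Int.emod_add_ediv a (2 ^ k)
  have h2 := Int.emod_add_ediv (a / 2 ^ k) 2
  have ha1 : 0 ≤ a % 2 ^ k := Int.emod_nonneg _ (by positivity)
  have ha2 : a % 2 ^ k < 2 ^ k := Int.emod_lt_of_pos _ hp
  have hbit : pvBit a k = 0 ∨ pvBit a k = 1 := by
    rw [pvBit]; exact Int.emod_two_eq_zero_or_one _
  have hpow : (2:Int) ^ (k + 1) = 2 ^ k * 2 := by ring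
  exact (pv_divmod a (2 ^ (k + 1)) (a / 2 ^ k / 2) (a % 2 ^ k + 2 ^ k * pvBit a k)
    (by positivity)
    (by rw [pvBit]; linear_combination h1 + (2:Int) ^ k * h2)
    (by rcases hbit with h | h <;> rw [h] <;> linarith)
    (by rcases hbit with h | h <;> rw [h, hpow] <;> linarith)).2

-- the full-adder step: carry_{k+1} = maj(bit_k a, bit_k b, carry_k)
theorem pv_car_step (a b : Int) (k : Nat) :
    pvCar a b (k + 1) = if 2 ≤ pvBit a k + pvBit b k + pvCar a b k then 1 else 0 := by
  have hp : (0:Int) < 2 ^ k := by positivity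
  have hS := Int.emod_add_ediv (a % 2 ^ k + b % 2 ^ k) (2 ^ k)
  have hr1 : 0 ≤ (a % 2 ^ k + b % 2 ^ k) % 2 ^ k := Int.emod_nonneg _ (by positivity)
  have hr2 : (a % 2 ^ k + b % 2 ^ k) % 2 ^ k < 2 ^ k := Int.emod_lt_of_pos _ hp
  have hA : pvBit a k = 0 ∨ pvBit a k = 1 := by rw [pvBit]; omega
  have hB : pvBit b k = 0 ∨ pvBit b k = 1 := by rw [pvBit]; omega
  have hC := pv_car_bounds a b k
  have hnum : a % 2 ^ (k+1) + b % 2 ^ (k+1)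
      = (a % 2 ^ k + b % 2 ^ k) % 2 ^ k
        + 2 ^ k * (pvBit a k + pvBit b k + pvCar a b k) := by
    rw [pv_emod_succ a k, pv_emod_succ b k]
    have : pvCar a b k = (a % 2 ^ k + b % 2 ^ k) / 2 ^ k := rfl
    rw [this] at *
    linarith
  have hpow : (2:Int) ^ (k + 1) = 2 ^ k * 2 := by ring
  rw [pvCar, hnum]
  set r := (a % 2 ^ k + b % 2 ^ k) % 2 ^ k with hrdef
  set s := pvBit a k + pvBit b k + pvCar a b k with hsdef
  have hs : s = 0 ∨ s = 1 ∨ s = 2 ∨ s = 3 := by omega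
  rcases hs with h | h | h | h <;> rw [h] <;> simp only [hpow]
  · norm_num; exact Int.ediv_eq_zero_of_lt hr1 (by linarith)
  · norm_num
    refine ((Int.ediv_emod_unique (q := 0) (r := r + 2 ^ k) (by positivity)).mpr
      ⟨by ring, by linarith, by linarith⟩).1
  · norm_num
    refine ((Int.ediv_emod_unique (q := 1) (r := r) (by positivity)).mpr
      ⟨by ring, by linarith, by linarith⟩).1
  · norm_num
    refine ((Int.ediv_emod_unique (q := 1) (r := r + 2 ^ k) (by positivity)).mpr
      ⟨by ring, by linarith, by linarith⟩).1

-- B's element: bit k+1 of (a+b)^a^b is the carry into position k+1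
theorem pv_bxor_bit_car (a b : Int) (k : Nat) :
    pvBit (PySem.Int.bxor (PySem.Int.bxor (a + b) a) b) (k + 1) = pvCar a b (k + 1) := by
  rw [pv_bit_bxor, pv_bit_bxor]
  have hab : pvBit (a + b) (k+1) = (a / 2 ^ (k+1) + b / 2 ^ (k+1) + pvCar a b (k+1)) % 2 := by
    rw [pvBit, pv_ediv_add]
  have hA : pvBit a (k+1) = (a / 2 ^ (k+1)) % 2 := rfl
  have hB : pvBit b (k+1) = (b / 2 ^ (k+1)) % 2 := rfl
  have hC := pv_car_bounds a b (k+1)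
  rw [hab, hA, hB]
  omega

theorem pv_car_zero (a b : Int) : pvCar a b 0 = 0 := by
  simp [pvCar]

-- A's loop invariant over List.range
theorem pv_A_fold (a b : Int) (m : Nat) :
    (List.range m).foldl
      (fun (st : List Int × Int) (k : Nat) =>
        (st.1 ++ [if 2 ≤ pvBit a k + pvBit b k + st.2 then (1:Int) else 0],
         if 2 ≤ pvBit a k + pvBit b k + st.2 then (1:Int) else 0))
      ([], 0)
    = ((List.range m).map (fun k => pvCar a b (k + 1)), pvCar a b m) := by
  induction m with
  | zero => simp [pv_car_zero]
  | succ m ih =>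
      rw [List.range_succ, List.foldl_append, ih, List.map_append]
      simp only [List.foldl_cons, List.foldl_nil, List.map_cons, List.map_nil]
      rw [← pv_car_step a b m]

-- ===== VERDICT (by name: the statement is the Claim_ definition above) =====
theorem carry_vector_full_spec : Claim_equal_carry_vector_full := by
  intro a b n _
  show carry_vector_full a b n = carry_vector_full_alt a b n
  rw [carry_vector_full, carry_vector_full_alt, PySem.List.pyRange_one]
  rw [List.foldl_map, List.map_map]
  have hbody :
      (fun (st : List Int × Int) (k : Nat) =>
        let ai := PySem.Int.band (a >>> ((0:Int) + ↑k).toNat) 1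
        let bi := PySem.Int.band (b >>> ((0:Int) + ↑k).toNat) 1
        let s := ai + bi + st.2
        let c : Int := if 2 ≤ s then 1 else 0
        (st.1 ++ [c], c))
      = (fun (st : List Int × Int) (k : Nat) =>
        (st.1 ++ [if 2 ≤ pvBit a k + pvBit b k + st.2 then (1:Int) else 0],
         if 2 ≤ pvBit a k + pvBit b k + st.2 then (1:Int) else 0)) := by
    funext st k
    have ht : ((0:Int) + ↑k).toNat = k := by omega
    simp only [ht, pv_band_bit]
  rw [hbody, pv_A_fold]
  refine List.map_congr_left ?_
  intro k _
  have ht : ((0:Int) + ↑k + 1).toNat = k + 1 := by omega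
  simp only [Function.comp_apply, ht, pv_band_bit_int, pv_bxor_bit_car]
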